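-- pv_equiv track=rewrite | github.com/fredpottier/KBGPT | src/knowbase/stratified/pass1_v22/zone_clusterer.py | _zones_adjacent
-- ===== SOURCE A (Python) =====
-- from typing import Dict, List, Optional, Tuple
--
-- def _zones_adjacent(
--     zone_ids_a: List[str], zone_ids_b: List[str]
-- ) -> bool:
--     """Vérifie si deux ensembles de zones sont adjacents."""
--
--     def _zone_number(zid: str) -> int:
--         try:
--             return int(zid.lstrip("z"))
--         except (ValueError, AttributeError):
--             return -1
--
--     nums_a = {_zone_number(z) for z in zone_ids_a}
--     nums_b = {_zone_number(z) for z in zone_ids_b}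
--
--     for na in nums_a:
--         for nb in nums_b:
--             if abs(na - nb) <= 1:
--                 return True
--     return False
-- ===== SOURCE B (Python) =====
-- from typing import List
--
-- def _zones_adjacent(zone_ids_a: List[str], zone_ids_b: List[str]) -> bool:
--     """B: index zone_ids_b's numbers (with their +/-1 shifts) in one set, then a single
--     membership pass over zone_ids_a replaces A's all-pairs scan."""
--
--     def _zone_number(zid: str) -> int:
--         try:
--             return int(zid.lstrip("z"))
--         except (ValueError, AttributeError):
--             return -1
--
--     targets = {n + d for n in map(_zone_number, zone_ids_b) for d in (-1, 0, 1)}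
--     return any(_zone_number(z) in targets for z in zone_ids_a)
-- ===== Notes on version B (the rewrite author's own statement) =====
-- stated objective: alternative
-- what changed: B builds one set of zone_ids_b's numbers together with their +/-1 shifts, then answers with a single membership pass over zone_ids_a, replacing A's nested all-pairs scan over the two number sets.
import Mathlib
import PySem

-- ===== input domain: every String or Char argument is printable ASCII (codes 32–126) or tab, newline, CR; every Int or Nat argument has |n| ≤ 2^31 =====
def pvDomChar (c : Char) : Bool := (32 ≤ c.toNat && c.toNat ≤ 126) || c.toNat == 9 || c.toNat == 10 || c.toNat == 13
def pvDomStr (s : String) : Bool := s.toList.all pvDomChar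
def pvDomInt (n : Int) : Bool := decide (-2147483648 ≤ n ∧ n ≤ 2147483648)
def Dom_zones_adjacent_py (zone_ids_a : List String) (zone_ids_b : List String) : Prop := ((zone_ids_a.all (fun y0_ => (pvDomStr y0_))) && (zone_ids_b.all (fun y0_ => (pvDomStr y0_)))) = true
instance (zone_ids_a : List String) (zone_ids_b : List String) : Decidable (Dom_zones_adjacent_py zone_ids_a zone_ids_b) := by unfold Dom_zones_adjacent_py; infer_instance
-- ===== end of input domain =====

-- B replaces A's all-pairs scan over the two number sets by one set of zone_ids_b's numbers with their ±1 shifts and a single membership pass over zone_ids_a (alternative decomposition; not claimed faster).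


-- ===== PORT A =====
def pvZoneNumber (zid : String) : Int :=
  -- zid.lstrip("z") = drop leading 'z' chars (left side only; hand-ported, exact);
  -- int(...) with the -1 fallback on ValueError
  match PySem.Int.ofStr? (String.ofList (zid.toList.dropWhile (· == 'z'))) with
  | some n => n
  | none => -1

def zones_adjacent_py (zone_ids_a : List String) (zone_ids_b : List String) : Bool :=
  let nums_a : PySem.Set Int := PySem.Set.ofList (zone_ids_a.map pvZoneNumber)
  let nums_b : PySem.Set Int := PySem.Set.ofList (zone_ids_b.map pvZoneNumber)
  -- nested for-loops with early return True
  nums_a.any (fun na => nums_b.any (fun nb => (na - nb).natAbs ≤ 1))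

-- ===== PORT B =====
def zones_adjacent_py_alt (zone_ids_a : List String) (zone_ids_b : List String) : Bool :=
  let targets : PySem.Set Int :=
    PySem.Set.ofList ((zone_ids_b.map pvZoneNumber).flatMap (fun n => [n - 1, n, n + 1]))
  zone_ids_a.any (fun z => targets.contains (pvZoneNumber z))

-- ===== PRECONDITION & SPEC =====
def Spec_zones_adjacent_py (zone_ids_a : List String) (zone_ids_b : List String) (out : Bool) : Prop := out = zones_adjacent_py_alt zone_ids_a zone_ids_b
instance (zone_ids_a : List String) (zone_ids_b : List String) (out : Bool) : Decidable (Spec_zones_adjacent_py zone_ids_a zone_ids_b out) := by unfold Spec_zones_adjacent_py; infer_instance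

-- ===== CLAIM (what is proved, stated in full; the proofs are below) =====
def Claim_equal_zones_adjacent_py : Prop := ∀ (zone_ids_a : List String) (zone_ids_b : List String), Dom_zones_adjacent_py zone_ids_a zone_ids_b → Spec_zones_adjacent_py zone_ids_a zone_ids_b (zones_adjacent_py zone_ids_a zone_ids_b)

-- ===== LEMMAS AND PROOFS =====

-- ===== VERDICT (by name: the statement is the Claim_ definition above) =====
theorem zones_adjacent_py_key : ∀ (a b : List String),
    zones_adjacent_py a b = zones_adjacent_py_alt a b := by
  intro a b
  unfold zones_adjacent_py zones_adjacent_py_alt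
  dsimp only
  rw [Bool.eq_iff_iff]
  simp only [List.any_eq_true, decide_eq_true_eq]
  constructor
  · rintro ⟨na, hna, nb, hnb, h⟩
    simp only [PySem.Set.mem_ofList, List.mem_map] at hna hnb
    obtain ⟨za, hza, rfl⟩ := hna
    obtain ⟨zb, hzb, rfl⟩ := hnb
    refine ⟨za, hza, ?_⟩
    simp only [PySem.Set.contains_iff, PySem.Set.mem_ofList, List.mem_flatMap, List.mem_map]
    refine ⟨pvZoneNumber zb, ⟨zb, hzb, rfl⟩, ?_⟩
    have : (pvZoneNumber za - pvZoneNumber zb).natAbs ≤ 1 := h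
    simp only [List.mem_cons, List.not_mem_nil, or_false]
    omega
  · rintro ⟨za, hza, h⟩
    simp only [PySem.Set.contains_iff, PySem.Set.mem_ofList, List.mem_flatMap, List.mem_map] at h
    obtain ⟨n, ⟨zb, hzb, rfl⟩, hmem⟩ := h
    refine ⟨pvZoneNumber za, ?_, pvZoneNumber zb, ?_, ?_⟩
    · simp only [PySem.Set.mem_ofList, List.mem_map]; exact ⟨za, hza, rfl⟩
    · simp only [PySem.Set.mem_ofList, List.mem_map]; exact ⟨zb, hzb, rfl⟩
    · simp only [List.mem_cons, List.not_mem_nil, or_false] at hmem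
      omega

-- ===== VERDICT =====
theorem zones_adjacent_py_spec : Claim_equal_zones_adjacent_py := by
  intro a b _
  exact zones_adjacent_py_key a b
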